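-- pv_equiv track=rewrite | github.com/Nitya-sigadapu/flames | flames.py | remove_common_letters
-- ===== SOURCE A (Python) =====
-- def remove_common_letters(a: list, b: list) -> (list, list):
--     """Remove letters present in both lists (one-to-one)."""
--     a_copy = a.copy()
--     b_copy = b.copy()
--     i = 0
--     while i < len(a_copy):
--         ch = a_copy[i]
--         if ch in b_copy:
--             a_copy.pop(i)
--             b_copy.remove(ch)
--             # don't increment i because list shifted
--         else:
--             i += 1
--     return a_copy, b_copy
-- ===== SOURCE B (Python) =====
-- def remove_common_letters(a: list, b: list) -> (list, list):
--     """Remove letters present in both lists (one-to-one)."""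
--     def counts(xs):
--         c = {}
--         for x in xs:
--             c[x] = c.get(x, 0) + 1
--         return c
--
--     def filter_out(xs, budget):
--         out = []
--         for x in xs:
--             if budget.get(x, 0) > 0:
--                 budget[x] -= 1
--             else:
--                 out.append(x)
--         return out
--
--     return filter_out(a, counts(b)), filter_out(b, counts(a))
-- ===== Notes on version B (the rewrite author's own statement) =====
-- stated objective: faster
-- what changed: Replaces the quadratic pop/remove loop with two independent counting passes: build a count dict of the other list, then keep each element whose remaining budget is exhausted.
import Mathlib
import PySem

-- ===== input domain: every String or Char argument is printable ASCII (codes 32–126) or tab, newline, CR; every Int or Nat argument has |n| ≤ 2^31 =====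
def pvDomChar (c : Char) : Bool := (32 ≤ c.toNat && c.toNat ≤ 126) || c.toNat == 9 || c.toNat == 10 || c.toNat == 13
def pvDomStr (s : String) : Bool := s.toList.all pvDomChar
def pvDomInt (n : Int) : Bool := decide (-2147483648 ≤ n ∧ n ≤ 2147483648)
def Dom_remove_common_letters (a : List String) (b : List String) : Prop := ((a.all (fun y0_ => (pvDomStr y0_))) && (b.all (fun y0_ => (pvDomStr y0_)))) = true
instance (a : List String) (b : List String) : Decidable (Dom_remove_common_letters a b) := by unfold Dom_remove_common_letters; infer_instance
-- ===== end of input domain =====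

-- B replaces A's quadratic pop/remove index loop with two independent counting passes (count dict + budget filter): faster.


-- ===== PORT A =====
-- the while loop: i an index into the shrinking a_copy; pop(i) is eraseIdx (in range, guard h),
-- b_copy.remove(ch) is List.erase (ch ∈ bc guaranteed by the branch, PySem.List.remove?_eq_some_erase)
def pvLoopA (i : Nat) (ac bc : List String) : List String × List String :=
  if h : i < ac.length then
    let ch := ac[i]
    if ch ∈ bc then
      pvLoopA i (ac.eraseIdx i) (bc.erase ch)
    else
      pvLoopA (i + 1) ac bc
  else (ac, bc)
termination_by ac.length - i
decreasing_by
  · have := List.length_eraseIdx_of_lt h; omega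
  · omega

def remove_common_letters (a : List String) (b : List String) : List String × List String :=
  pvLoopA 0 a b

-- ===== PORT B =====
-- counts: c[x] = c.get(x, 0) + 1 over xs
def pvCounts (xs : List String) : PySem.Dict String Int :=
  xs.foldl (fun c x => c.insert x (c.getD x 0 + 1)) PySem.Dict.empty

-- filter_out: keep x if budget.get(x,0) is exhausted, otherwise decrement and drop
def pvFilterOut : List String → PySem.Dict String Int → List String
  | [], _ => []
  | x :: rest, budget =>
    if budget.getD x 0 > 0 then pvFilterOut rest (budget.insert x (budget.getD x 0 - 1))
    else x :: pvFilterOut rest budget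

def remove_common_letters_alt (a : List String) (b : List String) : List String × List String :=
  (pvFilterOut a (pvCounts b), pvFilterOut b (pvCounts a))

-- ===== PRECONDITION & SPEC =====
def Spec_remove_common_letters (a : List String) (b : List String) (out : List String × List String) : Prop := out = remove_common_letters_alt a b
instance (a : List String) (b : List String) (out : List String × List String) : Decidable (Spec_remove_common_letters a b out) := by unfold Spec_remove_common_letters; infer_instance

-- ===== CLAIM (what is proved, stated in full; the proofs are below) =====
def Claim_equal_remove_common_letters : Prop := ∀ (a : List String) (b : List String), Dom_remove_common_letters a b → Spec_remove_common_letters a b (remove_common_letters a b)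

-- ===== LEMMAS AND PROOFS =====

-- budget filter with a plain function budget (proof-side abstraction of pvFilterOut)
def pvFO : List String → (String → Int) → List String
  | [], _ => []
  | x :: r, g => if g x > 0 then pvFO r (Function.update g x (g x - 1)) else x :: pvFO r g

-- structural recursion equivalent of A's loop (index 0 view)
def pvProcA : List String → List String → List String × List String
  | [], bc => ([], bc)
  | x :: r, bc =>
    if x ∈ bc then pvProcA r (bc.erase x)
    else ((x :: (pvProcA r bc).1), (pvProcA r bc).2)

theorem pvFilterOut_eq_fO : ∀ (xs : List String) (d : PySem.Dict String Int),
    pvFilterOut xs d = pvFO xs (fun k => d.getD k 0) := by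
  intro xs
  induction xs with
  | nil => intro d; rfl
  | cons x r ih =>
    intro d
    simp only [pvFilterOut, pvFO]
    by_cases h : d.getD x 0 > 0
    · rw [if_pos h, if_pos h, ih]
      congr 1
      funext k
      rw [PySem.Dict.getD_insert, Function.update_apply]
    · rw [if_neg h, if_neg h, ih]

theorem pvCounts_getD (xs : List String) (k : String) :
    (pvCounts xs).getD k 0 = (xs.count k : Int) := by
  unfold pvCounts
  rw [PySem.Dict.getD_foldl_insert_add_one]
  simp [PySem.Dict.getD_empty]

theorem pvFO_nonpos : ∀ (bc : List String) (g : String → Int), (∀ k, g k ≤ 0) → pvFO bc g = bc := by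
  intro bc
  induction bc with
  | nil => intro g _; rfl
  | cons y r ih =>
    intro g hg
    simp only [pvFO]
    have : ¬ g y > 0 := by have := hg y; omega
    simp [this, ih g hg]

theorem pvFO_succ : ∀ (bc : List String) (g : String → Int) (x : String), (∀ k, 0 ≤ g k) →
    pvFO bc (Function.update g x (g x + 1)) = pvFO (bc.erase x) g := by
  intro bc
  induction bc with
  | nil => intro g x _; rfl
  | cons y r ih =>
    intro g x hg
    by_cases hyx : y = x
    · subst hyx
      rw [List.erase_cons_head]
      simp only [pvFO, Function.update_self]
      have hpos : g y + 1 > 0 := by have := hg y; omega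
      rw [if_pos hpos]
      have : Function.update (Function.update g y (g y + 1)) y (g y + 1 - 1) = g := by
        rw [Function.update_idem]
        have : g y + 1 - 1 = g y := by omega
        rw [this, Function.update_eq_self]
      rw [this]
    · rw [List.erase_cons_tail (by simp [hyx])]
      simp only [pvFO, Function.update_apply, if_neg hyx]
      by_cases hy : g y > 0
      · rw [if_pos hy, if_pos hy]
        have hgx : (Function.update g y (g y - 1)) x = g x := by
          rw [Function.update_apply, if_neg (fun h => hyx h.symm)]
        have hcomm : Function.update (Function.update g x (g x + 1)) y (g y - 1)
            = Function.update (Function.update g y (g y - 1)) x ((Function.update g y (g y - 1)) x + 1) := by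
          rw [hgx, Function.update_comm (fun h => hyx h.symm)]
        rw [hcomm, ih (Function.update g y (g y - 1)) x (by
          intro k
          rw [Function.update_apply]
          split_ifs with hk
          · omega
          · exact hg k)]
      · rw [if_neg hy, if_neg hy, ih g x hg]

theorem pvProcA_fst : ∀ (xs bc : List String),
    (pvProcA xs bc).1 = pvFO xs (fun k => (bc.count k : Int)) := by
  intro xs
  induction xs with
  | nil => intro bc; rfl
  | cons x r ih =>
    intro bc
    simp only [pvProcA, pvFO]
    by_cases hx : x ∈ bc
    · have hc : 0 < bc.count x := List.count_pos_iff.mpr hx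
      rw [if_pos hx, if_pos (by exact_mod_cast hc), ih]
      congr 1
      funext k
      rw [Function.update_apply]
      by_cases hk : k = x
      · subst hk
        rw [if_pos rfl]
        have := List.count_erase_self (a := k) (l := bc)
        rw [this]
        have h1 : 1 ≤ bc.count k := hc
        push_cast [Nat.cast_sub h1]
        ring
      · rw [if_neg hk, List.count_erase_of_ne hk]
    · have hc : bc.count x = 0 := List.count_eq_zero.mpr hx
      rw [if_neg hx, if_neg (by simp [hc]), ih]

theorem pvProcA_snd : ∀ (xs bc : List String),
    (pvProcA xs bc).2 = pvFO bc (fun k => (xs.count k : Int)) := by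
  intro xs
  induction xs with
  | nil =>
    intro bc
    simp only [pvProcA]
    rw [pvFO_nonpos bc _ (by intro k; simp)]
  | cons x r ih =>
    intro bc
    have hfun : (fun k => (((x :: r).count k : Nat) : Int))
        = Function.update (fun k => ((r.count k : Nat) : Int)) x (((r.count x : Nat) : Int) + 1) := by
      funext k
      rw [Function.update_apply]
      by_cases hk : k = x
      · subst hk; rw [if_pos rfl, List.count_cons_self]; push_cast; ring
      · rw [if_neg hk, List.count_cons_of_ne (fun h => hk h.symm)]
    rw [hfun, pvFO_succ bc _ x (by intro k; positivity)]
    simp only [pvProcA]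
    by_cases hx : x ∈ bc
    · rw [if_pos hx, ih]
    · rw [if_neg hx, ih, List.erase_of_not_mem hx]

theorem pvLoopA_eq : ∀ (ac : List String) (i : Nat) (bc : List String),
    pvLoopA i ac bc = (ac.take i ++ (pvProcA (ac.drop i) bc).1, (pvProcA (ac.drop i) bc).2) := by
  intro ac i bc
  induction i, ac, bc using pvLoopA.induct with
  | case1 i ac bc h ch hmem ih =>
    rw [pvLoopA]
    rw [dif_pos h, if_pos hmem, ih]
    have hdrop : ac.drop i = ch :: ac.drop (i + 1) := List.drop_eq_getElem_cons h
    have hlen : (ac.take i).length = i := List.length_take_of_le (Nat.le_of_lt h)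
    have htake : (ac.eraseIdx i).take i = ac.take i := by
      rw [List.eraseIdx_eq_take_drop_succ, List.take_append, hlen]
      simp [List.take_take]
    have hdrop2 : (ac.eraseIdx i).drop i = ac.drop (i + 1) := by
      rw [List.eraseIdx_eq_take_drop_succ, List.drop_append, hlen]
      simp
    rw [htake, hdrop2, hdrop]
    simp only [pvProcA, if_pos hmem]
  | case2 i ac bc h ch hmem ih =>
    rw [pvLoopA]
    rw [dif_pos h, if_neg hmem, ih]
    have hdrop : ac.drop i = ch :: ac.drop (i + 1) := List.drop_eq_getElem_cons h
    have htake : ac.take (i + 1) = ac.take i ++ [ch] := by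
      rw [List.take_add_one, List.getElem?_eq_getElem h]
      rfl
    rw [hdrop, htake]
    simp only [pvProcA, if_neg hmem, List.append_assoc, List.cons_append, List.nil_append]
  | case3 i ac bc h =>
    rw [pvLoopA, dif_neg h]
    have hge : ac.length ≤ i := Nat.le_of_not_lt h
    rw [List.drop_eq_nil_of_le hge, List.take_of_length_le hge]
    simp [pvProcA]

-- ===== VERDICT (by name: the statement is the Claim_ definition above) =====
theorem remove_common_letters_spec : Claim_equal_remove_common_letters := by
  intro a b _
  unfold Spec_remove_common_letters remove_common_letters remove_common_letters_alt
  rw [pvLoopA_eq]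
  simp only [List.take_zero, List.drop_zero, List.nil_append]
  rw [pvProcA_fst, pvProcA_snd, pvFilterOut_eq_fO, pvFilterOut_eq_fO]
  congr 1 <;> congr 1 <;> funext k <;> rw [pvCounts_getD]
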